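-- pv_equiv track=rewrite | github.com/openakita/openakita | plugins/bgm-suggester/bgm_engine.py | _coerce_tempo_label
-- ===== SOURCE A (Python) =====
-- from typing import Any
--
-- KNOWN_TEMPO_LABELS: dict[str, tuple[int, int]] = {
--     # label -> inclusive bpm range, used by ``self_check`` to flag
--     # bpm/tempo_label mismatches (LLM sometimes says "fast" but emits 70 bpm).
--     "very-slow": (40, 60),
--     "slow": (60, 80),
--     "midtempo": (80, 110),
--     "upbeat": (110, 130),
--     "fast": (130, 160),
--     "very-fast": (160, 200),
-- }
--
-- def _coerce_tempo_label(v: Any, bpm: int) -> str: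
--     label = (str(v).strip().lower() if v is not None else "")
--     if label in KNOWN_TEMPO_LABELS:
--         return label
--     # No / unknown label → derive from bpm so the brief is still consistent.
--     for name, (lo, hi) in KNOWN_TEMPO_LABELS.items():
--         if lo <= bpm <= hi:
--             return name
--     return "midtempo"
-- ===== SOURCE B (Python) =====
-- # Same label check; derivation replaced by a sorted upper-bound table + hand-rolled
-- # binary search (bisect_left) instead of the linear dict scan.
--
-- _LABELS = ["very-slow", "slow", "midtempo", "upbeat", "fast", "very-fast"]
-- _HIS = [60, 80, 110, 130, 160, 200]  # inclusive upper bounds, parallel to _LABELS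
-- _LABEL_SET = {"very-slow", "slow", "midtempo", "upbeat", "fast", "very-fast"}
--
--
-- def _bisect_left(a, x):
--     lo, hi = 0, len(a)
--     while lo < hi:
--         mid = (lo + hi) // 2
--         if a[mid] < x:
--             lo = mid + 1
--         else:
--             hi = mid
--     return lo
--
--
-- def _coerce_tempo_label(v, bpm):
--     label = (str(v).strip().lower() if v is not None else "")
--     if label in _LABEL_SET:
--         return label
--     if bpm < 40 or bpm > 200:
--         return "midtempo"
--     return _LABELS[_bisect_left(_HIS, bpm)]
-- ===== Notes on version B (the rewrite author's own statement) =====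
-- stated objective: alternative
-- what changed: The bpm-to-label derivation walks no dict: labels and their inclusive upper bounds become two parallel sorted tables and a hand-rolled bisect_left binary search picks the bucket, with an explicit out-of-range guard returning 'midtempo'; the exact-label membership test stays.
import Mathlib
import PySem

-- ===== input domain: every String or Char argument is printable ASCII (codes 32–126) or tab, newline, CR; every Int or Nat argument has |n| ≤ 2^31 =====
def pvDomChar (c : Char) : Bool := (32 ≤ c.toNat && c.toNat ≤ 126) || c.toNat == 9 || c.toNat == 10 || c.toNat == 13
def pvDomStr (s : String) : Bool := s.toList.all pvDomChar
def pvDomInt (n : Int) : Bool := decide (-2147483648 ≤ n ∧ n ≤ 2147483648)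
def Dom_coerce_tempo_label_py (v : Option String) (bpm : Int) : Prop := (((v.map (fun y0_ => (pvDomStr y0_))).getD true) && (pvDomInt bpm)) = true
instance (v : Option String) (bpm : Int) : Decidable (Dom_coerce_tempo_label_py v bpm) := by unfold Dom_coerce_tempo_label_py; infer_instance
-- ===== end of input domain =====

-- B replaces A's linear scan over the bpm ranges by a binary search (bisect_left) on a
-- sorted upper-bound table with an out-of-range guard; the exact-label check is unchanged.

-- ===== PORT A =====
def knownTempoLabels : PySem.Dict String (Int × Int) :=
  PySem.Dict.ofList
    [("very-slow", (40, 60)), ("slow", (60, 80)), ("midtempo", (80, 110)),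
     ("upbeat", (110, 130)), ("fast", (130, 160)), ("very-fast", (160, 200))]

-- the for-loop over KNOWN_TEMPO_LABELS.items(): first range containing bpm, else "midtempo"
def findTempoName : List (String × Int × Int) → Int → String
  | [], _ => "midtempo"
  | (name, lo, hi) :: rest, bpm => if lo ≤ bpm ∧ bpm ≤ hi then name else findTempoName rest bpm

def coerce_tempo_label_py (v : Option String) (bpm : Int) : String :=
  let label := match v with
    | none => ""
    | some s => PySem.Str.lower (PySem.Str.strip s)
  if knownTempoLabels.contains label then label
  else findTempoName knownTempoLabels.items bpm

-- ===== PORT B =====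
def tempoLabelsB : List String := ["very-slow", "slow", "midtempo", "upbeat", "fast", "very-fast"]
def tempoHisB : List Int := [60, 80, 110, 130, 160, 200]
def tempoLabelSetB : PySem.Set String :=
  PySem.Set.ofList ["very-slow", "slow", "midtempo", "upbeat", "fast", "very-fast"]

-- the while-loop of _bisect_left (a[mid] is always in range there, so getD is exact)
def bisectLeftGo (a : List Int) (x : Int) (lo hi : Nat) : Nat :=
  if _h : lo < hi then
    let mid := (lo + hi) / 2
    if a.getD mid 0 < x then bisectLeftGo a x (mid + 1) hi else bisectLeftGo a x lo mid
  else lo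
termination_by hi - lo
decreasing_by all_goals omega

def coerce_tempo_label_py_alt (v : Option String) (bpm : Int) : String :=
  let label := match v with
    | none => ""
    | some s => PySem.Str.lower (PySem.Str.strip s)
  if tempoLabelSetB.contains label then label
  else if bpm < 40 ∨ 200 < bpm then "midtempo"
  -- _LABELS[idx]: here 40 ≤ bpm ≤ 200 forces idx ≤ 5, Python indexing never raises; getD is exact
  else tempoLabelsB.getD (bisectLeftGo tempoHisB bpm 0 tempoHisB.length) "midtempo"

-- ===== PRECONDITION & SPEC =====
def Spec_coerce_tempo_label_py (v : Option String) (bpm : Int) (out : String) : Prop := out = coerce_tempo_label_py_alt v bpm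
instance (v : Option String) (bpm : Int) (out : String) : Decidable (Spec_coerce_tempo_label_py v bpm out) := by unfold Spec_coerce_tempo_label_py; infer_instance

-- ===== CLAIM (what is proved, stated in full; the proofs are below) =====
def Claim_equal_coerce_tempo_label_py : Prop := ∀ (v : Option String) (bpm : Int), Dom_coerce_tempo_label_py v bpm → Spec_coerce_tempo_label_py v bpm (coerce_tempo_label_py v bpm)

-- ===== LEMMAS AND PROOFS =====
-- both membership tests are the same boolean
theorem contains_eq (label : String) :
    knownTempoLabels.contains label = tempoLabelSetB.contains label := by
  rw [show knownTempoLabels = PySem.Dict.mk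
        [("very-slow", (40, 60)), ("slow", (60, 80)), ("midtempo", (80, 110)),
         ("upbeat", (110, 130)), ("fast", (130, 160)), ("very-fast", (160, 200))] from rfl,
      show tempoLabelSetB = ["very-slow", "slow", "midtempo", "upbeat", "fast", "very-fast"] from rfl]
  rw [Bool.eq_iff_iff]
  simp [PySem.Set.contains]
  tauto

-- the two derivation strategies agree for every bpm
set_option maxRecDepth 10000 in
theorem derive_eq (bpm : Int) :
    findTempoName knownTempoLabels.items bpm =
      (if bpm < 40 ∨ 200 < bpm then "midtempo"
       else tempoLabelsB.getD (bisectLeftGo tempoHisB bpm 0 tempoHisB.length) "midtempo") := by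
  rw [show knownTempoLabels.items =
    [("very-slow", (40, 60)), ("slow", (60, 80)), ("midtempo", (80, 110)),
     ("upbeat", (110, 130)), ("fast", (130, 160)), ("very-fast", (160, 200))] from rfl]
  simp only [findTempoName, tempoHisB, tempoLabelsB, List.length]
  simp [bisectLeftGo]
  split_ifs <;> first | rfl | omega

-- ===== VERDICT (by name: the statement is the Claim_ definition above) =====
theorem coerce_tempo_label_py_spec : Claim_equal_coerce_tempo_label_py := by
  intro v bpm _
  unfold Spec_coerce_tempo_label_py coerce_tempo_label_py coerce_tempo_label_py_alt
  cases v with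
  | none =>
      dsimp only
      rw [contains_eq, derive_eq]
  | some s =>
      dsimp only
      rw [contains_eq, derive_eq]
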